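-- pv_equiv track=rewrite | github.com/MrBrantCode/unitest_baseline | mut_generate/mist_train_cf/cf_87297/solution.py | unique_prime_numbers
-- ===== SOURCE A (Python) =====
-- import math
--
-- def is_prime(n):
--     if n < 2:
--         return False
--     for i in range(2, int(math.sqrt(n)) + 1):
--         if n % i == 0:
--             return False
--     return True
--
-- def unique_prime_numbers(numbers):
--     primes = set()
--     for num in numbers:
--         if isinstance(num, float):
--             num = round(num)
--         if isinstance(num, int) and num > 0 and is_prime(num):
--             primes.add(num)
--     return primes
-- ===== SOURCE B (Python) =====
-- import math
--
-- def unique_prime_numbers(numbers):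
--     # Pass 1: apply A's transforms (round floats, keep isinstance-int positives) into a candidate set.
--     cands = set()
--     for num in numbers:
--         if isinstance(num, float):
--             num = round(num)
--         if isinstance(num, int) and num > 0:
--             cands.add(num)
--     if not cands:
--         return set()
--     # Sieve the primes up to isqrt(max candidate) once, then test each distinct
--     # candidate by trial division by those small primes only.
--     r = math.isqrt(max(cands))
--     sieve = [True] * (r + 1)
--     sieve[0] = False
--     sieve[1] = False
--     for i in range(2, math.isqrt(r) + 1):
--         for j in range(i * i, r + 1, i):
--             sieve[j] = False
--     small_primes = [i for i in range(2, r + 1) if sieve[i]]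
--     out = set()
--     for n in cands:
--         if n >= 2 and all(n % p for p in small_primes if p * p <= n):
--             out.add(n)
--     return out
-- ===== Notes on version B (the rewrite author's own statement) =====
-- stated objective: faster
-- what changed: Instead of trial-dividing every number by all integers up to sqrt(n), B first collects the distinct positive candidates into a set, sieves the primes up to isqrt(max candidate) once with a sieve of Eratosthenes, and then tests each distinct candidate by dividing only by those sieved primes.
import Mathlib
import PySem

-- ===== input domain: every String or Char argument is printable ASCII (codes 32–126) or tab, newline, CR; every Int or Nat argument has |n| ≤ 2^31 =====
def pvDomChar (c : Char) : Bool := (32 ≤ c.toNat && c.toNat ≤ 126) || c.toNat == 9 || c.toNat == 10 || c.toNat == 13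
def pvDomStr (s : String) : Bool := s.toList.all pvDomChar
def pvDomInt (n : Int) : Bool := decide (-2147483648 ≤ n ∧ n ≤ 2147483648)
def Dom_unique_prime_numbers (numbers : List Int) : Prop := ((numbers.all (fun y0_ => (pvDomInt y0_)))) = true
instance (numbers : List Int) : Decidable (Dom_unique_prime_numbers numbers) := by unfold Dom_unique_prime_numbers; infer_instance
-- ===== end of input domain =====

-- B replaces A's per-number trial division by every integer up to √n with one small
-- sieve of the primes up to isqrt(max candidate), then tests each DISTINCT positive
-- candidate by dividing by those primes only (objective: a different, faster-by-design
-- algorithm; the equality of the ports' lists also pins down the sets' insertion order).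

-- ===== PORT A =====
-- int(math.sqrt(n)) is ported as Nat.sqrt (= math.isqrt): exact on the domain
-- |n| ≤ 2^31, where IEEE double sqrt is correctly rounded, so int(math.sqrt(n)) = isqrt(n).
-- The early-return loop over range(2, isqrt(n)+1) is the conjunction List.all.
def isPrimeA (n : Int) : Bool :=
  if n < 2 then false
  else (PySem.List.pyRange 2 ((Nat.sqrt n.toNat : Int) + 1) 1).all
        (fun i => !(PySem.Int.mod n i == 0))

-- on List Int the isinstance(num, float) branch never fires and isinstance(num, int) is True
def unique_prime_numbers (numbers : List Int) : List Int :=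
  numbers.foldl
    (fun primes num => if num > 0 && isPrimeA num then PySem.Set.add primes num else primes)
    PySem.Set.empty

-- ===== PORT B =====
-- for j in range(i*i, r+1, i): sieve[j] = False   (a Python list with O(1) item
-- assignment is ported as Array; every written index j is provably in bounds)
def markB (r i : Int) (s : Array Bool) : Array Bool :=
  (PySem.List.pyRange (i * i) (r + 1) i).foldl (fun s j => s.setIfInBounds j.toNat false) s

-- sieve = [True]*(r+1); sieve[0] = sieve[1] = False; for i in range(2, isqrt(r)+1): mark
def sieveB (r : Int) : Array Bool :=
  (PySem.List.pyRange 2 ((Nat.sqrt r.toNat : Int) + 1) 1).foldl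
    (fun s i => markB r i s)
    (((Array.replicate (r + 1).toNat true).setIfInBounds 0 false).setIfInBounds 1 false)

-- small_primes = [i for i in range(2, r+1) if sieve[i]]  (index i is in range: 0 ≤ i ≤ r)
def smallPrimesB (r : Int) : List Int :=
  (PySem.List.pyRange 2 (r + 1) 1).filter
    (fun i => ((sieveB r)[i.toNat]?).getD false)

-- n >= 2 and all(n % p for p in small_primes if p * p <= n)
def isPrimeB (sp : List Int) (n : Int) : Bool :=
  (2 ≤ n) && (sp.filter (fun p => p * p ≤ n)).all (fun p => !(PySem.Int.mod n p == 0))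

def unique_prime_numbers_alt (numbers : List Int) : List Int :=
  let cands : PySem.Set Int := numbers.foldl
    (fun s num => if num > 0 then PySem.Set.add s num else s) PySem.Set.empty
  if cands = [] then PySem.Set.empty
  else
    match PySem.List.max? cands (fun y => y) with
    | none => PySem.Set.empty      -- unreachable: cands ≠ []
    | some mx =>
      let sp := smallPrimesB (Nat.sqrt mx.toNat : Int)   -- r = math.isqrt(max(cands))
      cands.foldl (fun out n => if isPrimeB sp n then PySem.Set.add out n else out)
        PySem.Set.empty

-- ===== PRECONDITION & SPEC =====
def Spec_unique_prime_numbers (numbers : List Int) (out : List Int) : Prop := out = unique_prime_numbers_alt numbers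
instance (numbers : List Int) (out : List Int) : Decidable (Spec_unique_prime_numbers numbers out) := by unfold Spec_unique_prime_numbers; infer_instance

-- ===== CLAIM (what is proved, stated in full; the proofs are below) =====
def Claim_equal_unique_prime_numbers : Prop := ∀ (numbers : List Int), Dom_unique_prime_numbers numbers → Spec_unique_prime_numbers numbers (unique_prime_numbers numbers)

-- ===== LEMMAS AND PROOFS =====

-- A's trial division computes primality of n.toNat.
theorem isPrimeA_eq (n : Int) : isPrimeA n = decide (Nat.Prime n.toNat) := by
  unfold isPrimeA
  by_cases h2 : n < 2
  · have hnp : ¬ Nat.Prime n.toNat := by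
      intro hp; have := hp.two_le; omega
    simp [h2, hnp]
  · rw [if_neg h2]
    rw [Bool.eq_iff_iff, decide_eq_true_iff, List.all_eq_true]
    have hcast : ((n.toNat : Int)) = n := Int.toNat_of_nonneg (by omega)
    constructor
    · intro h
      rw [Nat.prime_def_le_sqrt]
      refine ⟨by omega, fun m hm hms hdvd => ?_⟩
      have hmem : (m : Int) ∈ PySem.List.pyRange 2 ((Nat.sqrt n.toNat : Int) + 1) 1 := by
        rw [PySem.List.mem_pyRange_one]
        constructor
        · exact_mod_cast hm
        · have : (m : Int) ≤ (Nat.sqrt n.toNat : Int) := by exact_mod_cast hms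
          omega
      have := h _ hmem
      simp only [Bool.not_eq_eq_eq_not, Bool.not_true, beq_eq_false_iff_ne, ne_eq] at this
      apply this
      rw [PySem.Int.mod_eq_zero_iff_dvd]
      rw [← hcast]
      exact_mod_cast hdvd
    · intro hp i hi
      rw [PySem.List.mem_pyRange_one] at hi
      simp only [Bool.not_eq_eq_eq_not, Bool.not_true, beq_eq_false_iff_ne, ne_eq]
      intro hmod
      rw [PySem.Int.mod_eq_zero_iff_dvd] at hmod
      rw [Nat.prime_def_le_sqrt] at hp
      refine hp.2 i.toNat (by omega) (by omega) ?_
      have : (i.toNat : Int) ∣ (n.toNat : Int) := by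
        rw [hcast, Int.toNat_of_nonneg (by omega : (0:Int) ≤ i)]
        exact hmod
      exact_mod_cast this

-- a guarded Set.add loop is Set.ofList of the filtered list (Bool test / Prop test)
theorem foldl_add_if (p : Int → Bool) (l : List Int) :
    l.foldl (fun s x => if p x then PySem.Set.add s x else s) PySem.Set.empty
      = PySem.Set.ofList (l.filter p) := by
  rw [PySem.List.foldl_if_eq_foldl_filter p PySem.Set.add l PySem.Set.empty,
    PySem.Set.ofList_eq_foldl]
  rfl

theorem foldl_add_ite (p : Int → Prop) [DecidablePred p] (l : List Int) :
    l.foldl (fun s x => if p x then PySem.Set.add s x else s) PySem.Set.empty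
      = PySem.Set.ofList (l.filter (fun x => decide (p x))) := by
  rw [PySem.List.foldl_ite_eq_foldl_filter p PySem.Set.add l PySem.Set.empty,
    PySem.Set.ofList_eq_foldl]
  rfl

theorem filter_add (q : Int → Bool) (s : List Int) (x : Int) :
    (PySem.Set.add s x).filter q
      = if q x then PySem.Set.add (s.filter q) x else s.filter q := by
  by_cases hx : x ∈ s <;> by_cases hq : q x <;>
    simp [PySem.Set.add, hx, hq, List.filter_append, List.mem_filter]

theorem filter_foldl_add (q : Int → Bool) (l : List Int) : ∀ (s : List Int),
    (l.foldl PySem.Set.add s).filter q = (l.filter q).foldl PySem.Set.add (s.filter q) := by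
  induction l with
  | nil => intro s; simp
  | cons x t ih =>
    intro s
    simp only [List.foldl_cons, List.filter_cons]
    rw [ih, filter_add]
    by_cases hq : q x <;> simp [hq]

-- forming the set commutes with filtering by a value test
theorem ofList_filter (q : Int → Bool) (l : List Int) :
    PySem.Set.ofList (l.filter q) = (PySem.Set.ofList l).filter q := by
  rw [PySem.Set.ofList_eq_foldl, PySem.Set.ofList_eq_foldl, filter_foldl_add]
  rfl

theorem foldl_add_of_nodup (l : List Int) : ∀ (s : List Int),
    l.Nodup → (∀ x ∈ l, x ∉ s) → l.foldl PySem.Set.add s = s ++ l := by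
  induction l with
  | nil => intro s _ _; simp
  | cons x t ih =>
    intro s hnd hdis
    simp only [List.foldl_cons]
    have hxs : x ∉ s := hdis x (by simp)
    have hadd : PySem.Set.add s x = s ++ [x] := by
      simp [PySem.Set.add, hxs]
    rw [hadd, ih (s ++ [x]) (List.nodup_cons.mp hnd).2]
    · simp
    · intro y hy
      simp only [List.mem_append, List.mem_singleton]
      rintro (h | rfl)
      · exact hdis y (by simp [hy]) h
      · exact (List.nodup_cons.mp hnd).1 hy

-- a Nodup list is already its own set
theorem ofList_of_nodup (l : List Int) (h : l.Nodup) : PySem.Set.ofList l = l := by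
  rw [PySem.Set.ofList_eq_foldl, foldl_add_of_nodup l [] h (by simp)]
  rfl

theorem size_foldl_set (js : List Int) : ∀ (s : Array Bool),
    (js.foldl (fun s j => s.setIfInBounds j.toNat false) s).size = s.size := by
  induction js with
  | nil => intro s; rfl
  | cons x t ih => intro s; simp only [List.foldl_cons]; rw [ih, Array.size_setIfInBounds]

theorem getElem?_foldl_set (js : List Int) : ∀ (s : Array Bool) (k : Nat),
    (js.foldl (fun s j => s.setIfInBounds j.toNat false) s)[k]? =
      if js.any (fun j => j.toNat == k) = true ∧ k < s.size then some false else s[k]? := by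
  induction js with
  | nil => intro s k; simp
  | cons x t ih =>
    intro s k
    simp only [List.foldl_cons, List.any_cons]
    rw [ih, Array.size_setIfInBounds, Array.getElem?_setIfInBounds]
    by_cases hk : k < s.size
    · by_cases hx : x.toNat = k <;> by_cases ht : t.any (fun j => j.toNat == k) = true <;>
        simp [hk, hx, ht]
    · have hnone : s[k]? = none := Array.getElem?_eq_none (by omega)
      by_cases hx : x.toNat = k <;> by_cases ht : t.any (fun j => j.toNat == k) = true <;>
        simp [hk, hx, ht, hnone]

theorem getElem?_foldl_mark (r : Int) (outer : List Int) : ∀ (s : Array Bool) (k : Nat),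
    (outer.foldl (fun s i => markB r i s) s)[k]? =
      if outer.any
            (fun i => (PySem.List.pyRange (i * i) (r + 1) i).any (fun j => j.toNat == k)) = true
          ∧ k < s.size then some false else s[k]? := by
  induction outer with
  | nil => intro s k; simp
  | cons x t ih =>
    intro s k
    simp only [List.foldl_cons, List.any_cons]
    rw [ih]
    unfold markB
    rw [size_foldl_set, getElem?_foldl_set]
    by_cases hk : k < s.size
    · by_cases hx : (PySem.List.pyRange (x * x) (r + 1) x).any (fun j => j.toNat == k) = true <;>
        by_cases ht : t.any
            (fun i => (PySem.List.pyRange (i * i) (r + 1) i).any (fun j => j.toNat == k)) = true <;>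
        simp [hk, hx, ht]
    · have hnone : s[k]? = none := Array.getElem?_eq_none (by omega)
      by_cases hx : (PySem.List.pyRange (x * x) (r + 1) x).any (fun j => j.toNat == k) = true <;>
        by_cases ht : t.any
            (fun i => (PySem.List.pyRange (i * i) (r + 1) i).any (fun j => j.toNat == k)) = true <;>
        simp [hk, hx, ht, hnone]

-- a cell 2 ≤ k ≤ r of the sieve is marked exactly when k.toNat is composite
theorem marked_iff_not_prime (r k : Int) (h2 : 2 ≤ k) (hk : k ≤ r) :
    ((PySem.List.pyRange 2 ((Nat.sqrt r.toNat : Int) + 1) 1).any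
        (fun i => (PySem.List.pyRange (i * i) (r + 1) i).any (fun j => j.toNat == k.toNat)) = true)
      ↔ ¬ Nat.Prime k.toNat := by
  rw [List.any_eq_true]
  constructor
  · rintro ⟨i, hi, hina⟩
    rw [List.any_eq_true] at hina
    obtain ⟨j, hj, hjk⟩ := hina
    rw [beq_iff_eq] at hjk
    rw [PySem.List.mem_pyRange_one] at hi
    rw [PySem.List.mem_pyRange_iff_of_pos (by omega)] at hj
    obtain ⟨hij, hjr, hdvd⟩ := hj
    have hii : (2:Int) ≤ i := hi.1
    have hjeq : j = k := by
      have : 0 ≤ j := le_trans (by nlinarith) hij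
      omega
    subst hjeq
    have hdk : i ∣ j := by
      have h1 : i ∣ i * i := dvd_mul_left i i
      have := dvd_add hdvd h1
      simpa using this
    intro hp
    have hdn : i.toNat ∣ j.toNat := by
      rw [← Int.natCast_dvd_natCast,
        Int.toNat_of_nonneg (by omega : (0:Int) ≤ i),
        Int.toNat_of_nonneg (by omega : (0:Int) ≤ j)]
      exact hdk
    rcases (hp.eq_one_or_self_of_dvd _ hdn) with h | h
    · omega
    · have hieq : i = j := by omega
      rw [← hieq] at hij
      nlinarith [hij, hii]
  · intro hnp
    set p := (k.toNat).minFac with hp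
    have hne1 : k.toNat ≠ 1 := by omega
    have hpp : Nat.Prime p := Nat.minFac_prime hne1
    have hpd : p ∣ k.toNat := Nat.minFac_dvd _
    have hpsq : p ^ 2 ≤ k.toNat := Nat.minFac_sq_le_self (by omega) hnp
    have hpr : p ≤ Nat.sqrt r.toNat := by
      rw [Nat.le_sqrt]
      have : k.toNat ≤ r.toNat := by omega
      nlinarith [hpsq]
    refine ⟨(p : Int), ?_, ?_⟩
    · rw [PySem.List.mem_pyRange_one]
      constructor
      · exact_mod_cast hpp.two_le
      · have : (p : Int) ≤ (Nat.sqrt r.toNat : Int) := by exact_mod_cast hpr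
        omega
    · rw [List.any_eq_true]
      refine ⟨k, ?_, by simp⟩
      rw [PySem.List.mem_pyRange_iff_of_pos (by exact_mod_cast hpp.pos)]
      refine ⟨?_, by omega, ?_⟩
      · have hsq : (p : Int) * (p : Int) ≤ (k.toNat : Int) := by
          exact_mod_cast (by nlinarith [hpsq] : p * p ≤ k.toNat)
        omega
      · apply Int.dvd_sub
        · have hpk : (p : Int) ∣ (k.toNat : Int) := by exact_mod_cast hpd
          have hkk : ((k.toNat : Int)) = k := Int.toNat_of_nonneg (by omega)
          rwa [hkk] at hpk
        · exact dvd_mul_left _ _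

-- the final sieve cell at 2 ≤ k ≤ r holds the primality of k
theorem sieve_get (r k : Int) (h2 : 2 ≤ k) (hk : k ≤ r) :
    ((sieveB r)[k.toNat]?).getD false = decide (Nat.Prime k.toNat) := by
  unfold sieveB
  rw [getElem?_foldl_mark]
  have hlen : (((Array.replicate (r + 1).toNat true).setIfInBounds 0 false).setIfInBounds 1
      false).size = (r + 1).toNat := by simp
  have hklen : k.toNat < (r + 1).toNat := by omega
  have hbase : (((Array.replicate (r + 1).toNat true).setIfInBounds 0 false).setIfInBounds 1
      false)[k.toNat]? = some true := by
    rw [Array.getElem?_setIfInBounds, Array.getElem?_setIfInBounds, Array.getElem?_replicate]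
    have h0 : (0:Nat) ≠ k.toNat := by omega
    have h1 : (1:Nat) ≠ k.toNat := by omega
    simp [h0, h1, hklen]
  rw [hlen, hbase]
  by_cases hm : (PySem.List.pyRange 2 ((Nat.sqrt r.toNat : Int) + 1) 1).any
      (fun i => (PySem.List.pyRange (i * i) (r + 1) i).any (fun j => j.toNat == k.toNat)) = true
  · have := (marked_iff_not_prime r k h2 hk).mp hm
    simp [hm, hklen, this]
  · have := (not_iff_not.mpr (marked_iff_not_prime r k h2 hk)).mp hm
    rw [not_not] at this
    simp [hm, this]

-- the sieve's surviving indices are exactly the primes in [2, r]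
theorem mem_smallPrimesB (r p : Int) :
    p ∈ smallPrimesB r ↔ 2 ≤ p ∧ p ≤ r ∧ Nat.Prime p.toNat := by
  unfold smallPrimesB
  rw [List.mem_filter, PySem.List.mem_pyRange_one]
  constructor
  · rintro ⟨⟨hp2, hpr⟩, hs⟩
    have := sieve_get r p hp2 (by omega)
    rw [this] at hs
    exact ⟨hp2, by omega, of_decide_eq_true hs⟩
  · rintro ⟨hp2, hpr, hpp⟩
    refine ⟨⟨hp2, by omega⟩, ?_⟩
    rw [sieve_get r p hp2 hpr]
    exact decide_eq_true hpp

-- trial division by the sieved primes computes primality for 1 ≤ n ≤ mx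
theorem isPrimeB_eq (mx n : Int) (h1 : 1 ≤ n) (hn : n ≤ mx) :
    isPrimeB (smallPrimesB (Nat.sqrt mx.toNat : Int)) n = decide (Nat.Prime n.toNat) := by
  by_cases hn2 : 2 ≤ n
  · unfold isPrimeB
    rw [Bool.eq_iff_iff, decide_eq_true_iff]
    simp only [Bool.and_eq_true, decide_eq_true_iff, List.all_eq_true, List.mem_filter]
    constructor
    · rintro ⟨-, hall⟩
      by_contra hnp
      set p := (n.toNat).minFac with hp
      have hpp : Nat.Prime p := Nat.minFac_prime (by omega)
      have hpd : p ∣ n.toNat := Nat.minFac_dvd _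
      have hpsq : p ^ 2 ≤ n.toNat := Nat.minFac_sq_le_self (by omega) hnp
      have hpsqi : (p : Int) * (p : Int) ≤ n := by
        have : (p : Int) * (p : Int) ≤ (n.toNat : Int) :=
          by exact_mod_cast (by nlinarith [hpsq] : p * p ≤ n.toNat)
        omega
      have hpmem : (p : Int) ∈ smallPrimesB (Nat.sqrt mx.toNat : Int) := by
        rw [mem_smallPrimesB]
        refine ⟨by exact_mod_cast hpp.two_le, ?_, by simpa using hpp⟩
        have : p ≤ Nat.sqrt mx.toNat := by
          rw [Nat.le_sqrt]
          nlinarith [hpsq, (by omega : n.toNat ≤ mx.toNat)]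
        exact_mod_cast this
      have := hall (p : Int) ⟨hpmem, by simpa using hpsqi⟩
      simp only [Bool.not_eq_eq_eq_not, Bool.not_true, beq_eq_false_iff_ne, ne_eq] at this
      apply this
      rw [PySem.Int.mod_eq_zero_iff_dvd]
      have hpk : (p : Int) ∣ (n.toNat : Int) := by exact_mod_cast hpd
      rwa [Int.toNat_of_nonneg (by omega : (0:Int) ≤ n)] at hpk
    · intro hprime
      refine ⟨hn2, fun q hq => ?_⟩
      obtain ⟨hqsp, hq2⟩ := hq
      rw [mem_smallPrimesB] at hqsp
      obtain ⟨hq2', hqr, hqprime⟩ := hqsp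
      have hqq : q * q ≤ n := hq2
      simp only [Bool.not_eq_eq_eq_not, Bool.not_true, beq_eq_false_iff_ne, ne_eq]
      intro hmod
      rw [PySem.Int.mod_eq_zero_iff_dvd] at hmod
      have hdn : q.toNat ∣ n.toNat := by
        rw [← Int.natCast_dvd_natCast,
          Int.toNat_of_nonneg (by omega : (0:Int) ≤ q),
          Int.toNat_of_nonneg (by omega : (0:Int) ≤ n)]
        exact hmod
      rcases hprime.eq_one_or_self_of_dvd _ hdn with h | h
      · omega
      · have hqn : q = n := by omega
        rw [hqn] at hqq
        nlinarith [hqq, hn2]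
  · have hone : n = 1 := by omega
    subst hone
    simp [isPrimeB, Nat.not_prime_one]

-- ===== VERDICT (by name: the statement is the Claim_ definition above) =====
theorem unique_prime_numbers_spec : Claim_equal_unique_prime_numbers := by
  intro numbers _
  unfold Spec_unique_prime_numbers unique_prime_numbers unique_prime_numbers_alt
  dsimp only
  rw [foldl_add_if, foldl_add_ite]
  have hfa : (numbers.filter (fun num => decide (num > 0) && isPrimeA num))
      = (numbers.filter (fun num => decide (num > 0))).filter
          (fun num => decide (Nat.Prime num.toNat)) := by
    rw [List.filter_filter]
    apply List.filter_congr
    intro x _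
    rw [isPrimeA_eq, Bool.and_comm]
  rw [hfa, ofList_filter]
  by_cases hempty : PySem.Set.ofList (numbers.filter (fun num => decide (num > 0))) = []
  · simp [hempty]
  · rw [if_neg hempty]
    cases hmax : PySem.List.max? (PySem.Set.ofList (numbers.filter (fun num => decide (num > 0)))) (fun y => y) with
    | none => exact absurd ((PySem.List.max?_eq_none_iff _ _).mp hmax) hempty
    | some mx =>
      dsimp only
      rw [foldl_add_if]
      rw [ofList_of_nodup _ (List.Nodup.filter _ (PySem.Set.nodup_ofList _))]
      have hmx : 1 ≤ mx := by
        have hmem := PySem.List.max?_mem hmax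
        rw [PySem.Set.mem_ofList, List.mem_filter] at hmem
        have := of_decide_eq_true hmem.2
        omega
      apply List.filter_congr
      intro n hn
      have hn' := hn
      rw [PySem.Set.mem_ofList, List.mem_filter] at hn'
      have hpos : 0 < n := of_decide_eq_true hn'.2
      have hle : n ≤ mx := PySem.List.max?_isMax hmax n hn
      rw [isPrimeB_eq mx n (by omega) hle]
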